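-- pv_equiv track=rewrite | github.com/2kkman/tactracer_robot | include/UtilBLB.py | update_graph_with_new_nodes
-- ===== SOURCE A (Python) =====
-- def update_graph_with_new_nodes(node1, node2, total_distance, lsNodeScannedmm, start_number):
--     """
--     기존 두 노드 사이에 새로운 노드들을 추가하고 그래프를 갱신하는 함수
--
--     Parameters:
--     node1: 시작 노드 번호
--     node2: 끝 노드 번호
--     total_distance: 전체 구간 거리
--     new_node_distances: 시작점으로부터의 절대 거리 리스트
--     start_number: 신규 노드 번호 시작값
--
--     Returns:
--     list: [node1, node2, distance] 형태의 엣지 정보 리스트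
--     """
--     # 거리순으로 정렬
--     lsNodeScannedmm.sort()
--
--     # 새로운 노드 번호 할당
--     new_nodes = [start_number + i for i in range(len(lsNodeScannedmm))]
--
--     # 모든 노드의 위치를 순서대로 정렬
--     all_nodes = [node1] + new_nodes + [node2]
--     all_distances = [0] + lsNodeScannedmm + [total_distance]
--
--     # 엣지 정보 생성
--     edges = []
--     for i in range(len(all_nodes)-1):
--         current_node = all_nodes[i]
--         next_node = all_nodes[i+1]
--         distance = all_distances[i+1] - all_distances[i]
--         edges.append([current_node, next_node, distance])
--
--     return edges
-- ===== SOURCE B (Python) =====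
-- def update_graph_with_new_nodes(node1, node2, total_distance, lsNodeScannedmm, start_number):
--     # Walk the sorted list BACKWARDS, from node2 toward node1, maintaining the
--     # successor node/distance and prepending each edge, so the chain is built
--     # back-to-front instead of A's forward index loop over padded arrays.
--     lsNodeScannedmm.sort()  # same in-place mutation as A
--     edges = []
--     succ_node, succ_d = node2, total_distance
--     for i in range(len(lsNodeScannedmm) - 1, -1, -1):
--         d = lsNodeScannedmm[i]
--         edges = [[start_number + i, succ_node, succ_d - d]] + edges
--         succ_node, succ_d = start_number + i, d
--     return [[node1, succ_node, succ_d]] + edges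
-- ===== Notes on version B (the rewrite author's own statement) =====
-- stated objective: alternative
-- what changed: Builds the edge chain back-to-front: iterates the sorted distances in reverse from node2, maintaining a running successor node/distance and prepending each edge, instead of A's forward index loop over padded all_nodes/all_distances arrays.
import Mathlib
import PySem

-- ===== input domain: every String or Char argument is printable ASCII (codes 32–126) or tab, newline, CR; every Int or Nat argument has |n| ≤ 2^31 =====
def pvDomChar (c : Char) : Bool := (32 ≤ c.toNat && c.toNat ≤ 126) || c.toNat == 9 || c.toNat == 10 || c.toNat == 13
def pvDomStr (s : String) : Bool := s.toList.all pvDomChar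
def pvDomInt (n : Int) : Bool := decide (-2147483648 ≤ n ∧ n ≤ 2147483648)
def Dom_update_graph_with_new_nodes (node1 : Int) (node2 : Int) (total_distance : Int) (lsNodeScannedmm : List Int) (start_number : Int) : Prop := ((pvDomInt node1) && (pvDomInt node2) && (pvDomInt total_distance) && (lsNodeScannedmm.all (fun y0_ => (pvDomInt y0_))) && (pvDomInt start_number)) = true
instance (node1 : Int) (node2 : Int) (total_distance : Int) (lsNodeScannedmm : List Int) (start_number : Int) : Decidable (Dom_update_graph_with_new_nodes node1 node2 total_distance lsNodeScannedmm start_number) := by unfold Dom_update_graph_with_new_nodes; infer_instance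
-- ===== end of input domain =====

-- B builds the edge chain back-to-front: a reverse index loop from node2 with a running successor
-- node/distance, prepending edges, instead of A's forward loop over padded index arrays
-- (objective: alternative); both sort the argument in place in Python.


-- ===== PORT A =====
-- indices taken by the loop are always in range, so pyGetD's default 0 is never used
def update_graph_with_new_nodes (node1 : Int) (node2 : Int) (total_distance : Int) (lsNodeScannedmm : List Int) (start_number : Int) : List (List Int) :=
  let s := PySem.List.sorted lsNodeScannedmm (fun x => x) false
  let new_nodes := (PySem.List.pyRange 0 (s.length : Int) 1).map (fun i => start_number + i)
  let all_nodes := [node1] ++ new_nodes ++ [node2]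
  let all_distances := [(0 : Int)] ++ s ++ [total_distance]
  (PySem.List.pyRange 0 ((all_nodes.length : Int) - 1) 1).foldl
    (fun edges i =>
      edges ++ [[PySem.List.pyGetD all_nodes i 0,
                 PySem.List.pyGetD all_nodes (i + 1) 0,
                 PySem.List.pyGetD all_distances (i + 1) 0 - PySem.List.pyGetD all_distances i 0]])
    []

-- ===== PORT B =====
-- reverse loop range(len-1, -1, -1); indices are always in range, pyGetD's default 0 unused
def update_graph_with_new_nodes_alt (node1 : Int) (node2 : Int) (total_distance : Int) (lsNodeScannedmm : List Int) (start_number : Int) : List (List Int) :=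
  let s := PySem.List.sorted lsNodeScannedmm (fun x => x) false
  let st := (PySem.List.pyRange ((s.length : Int) - 1) (-1) (-1)).foldl
    (fun (st : List (List Int) × Int × Int) i =>
      let d := PySem.List.pyGetD s i 0
      ([[start_number + i, st.2.1, st.2.2 - d]] ++ st.1, start_number + i, d))
    ([], node2, total_distance)
  [[node1, st.2.1, st.2.2]] ++ st.1

-- ===== PRECONDITION & SPEC =====
def Spec_update_graph_with_new_nodes (node1 : Int) (node2 : Int) (total_distance : Int) (lsNodeScannedmm : List Int) (start_number : Int) (out : List (List Int)) : Prop := out = update_graph_with_new_nodes_alt node1 node2 total_distance lsNodeScannedmm start_number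
instance (node1 : Int) (node2 : Int) (total_distance : Int) (lsNodeScannedmm : List Int) (start_number : Int) (out : List (List Int)) : Decidable (Spec_update_graph_with_new_nodes node1 node2 total_distance lsNodeScannedmm start_number out) := by unfold Spec_update_graph_with_new_nodes; infer_instance

-- ===== CLAIM (what is proved, stated in full; the proofs are below) =====
def Claim_equal_update_graph_with_new_nodes : Prop := ∀ (node1 : Int) (node2 : Int) (total_distance : Int) (lsNodeScannedmm : List Int) (start_number : Int), Dom_update_graph_with_new_nodes node1 node2 total_distance lsNodeScannedmm start_number → Spec_update_graph_with_new_nodes node1 node2 total_distance lsNodeScannedmm start_number (update_graph_with_new_nodes node1 node2 total_distance lsNodeScannedmm start_number)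

-- ===== LEMMAS AND PROOFS =====

-- Common normal form: consecutive-pair edges over a node list and a distance list.
def pwAux : List Int → List Int → List (List Int)
  | a :: b :: ns, x :: y :: ds => [a, b, y - x] :: pwAux (b :: ns) (y :: ds)
  | _, _ => []

theorem pyGetD_cons_natSucc (x : Int) (xs : List Int) (k : Nat) (d : Int) :
    PySem.List.pyGetD (x :: xs) ((k : Int) + 1) d = PySem.List.pyGetD xs (k : Int) d := by
  have h1 : ((k : Int) + 1) = ((k + 1 : Nat) : Int) := by push_cast; ring
  rw [h1, PySem.List.pyGetD_natCast, PySem.List.pyGetD_natCast]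
  simp [List.getD]

-- A's index loop equals pwAux when the two lists have equal length.
theorem A_loop_eq_pwAux : ∀ (a d : List Int), a.length = d.length →
    (PySem.List.pyRange 0 ((a.length : Int) - 1) 1).map
      (fun i => [PySem.List.pyGetD a i 0, PySem.List.pyGetD a (i + 1) 0,
                 PySem.List.pyGetD d (i + 1) 0 - PySem.List.pyGetD d i 0])
    = pwAux a d := by
  intro a
  induction a with
  | nil => intro d _; simp [pwAux]
  | cons x a' ih =>
    intro d hlen
    match a', d with
    | [], _ => simp [pwAux]
    | b :: a'', [] => simp at hlen
    | b :: a'', z :: [] => simp at hlen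
    | b :: a'', z :: y :: d'' =>
      have h : (((x :: b :: a'').length : Int)) - 1 = ((a''.length + 1 : Nat) : Int) := by
        simp only [List.length_cons]; push_cast; ring
      rw [h, PySem.List.pyRange_one]
      simp only [sub_zero, Int.toNat_natCast, List.range_succ_eq_map, List.map_cons,
        List.map_map]
      have hd' : (b :: a'').length = (y :: d'').length := by simpa using hlen
      have hh := ih (y :: d'') hd'
      rw [PySem.List.pyRange_one] at hh
      simp only [sub_zero, List.length_cons, Nat.cast_add, Nat.cast_one,
        add_sub_cancel_right, Int.toNat_natCast, List.map_map] at hh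
      rw [show pwAux (x :: b :: a'') (z :: y :: d'')
            = [x, b, y - z] :: pwAux (b :: a'') (y :: d'') from rfl, ← hh]
      congr 1
      · simp [PySem.List.pyGetD]
      · apply List.map_congr_left
        intro k _
        simp only [Function.comp_apply, Nat.succ_eq_add_one, Nat.cast_add, Nat.cast_one,
          zero_add]
        rw [show ((k : Int) + 1 + 1) = (((k + 1 : Nat) : Int)) + 1 by push_cast; ring]
        rw [pyGetD_cons_natSucc, pyGetD_cons_natSucc, pyGetD_cons_natSucc,
          pyGetD_cons_natSucc]
        push_cast
        rfl

-- B's countdown index loop is a foldl over the reversed enumeration of s.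
theorem range_fold_eq_enum_fold {σ : Type} (s : List Int)
    (f : σ → Int × Int → σ) (init : σ) :
    (PySem.List.pyRange ((s.length : Int) - 1) (-1) (-1)).foldl
      (fun st i => f st (i, PySem.List.pyGetD s i 0)) init
    = ((PySem.List.enumerate s 0).reverse).foldl f init := by
  rw [PySem.List.pyRange_neg_one_eq_reverse]
  rw [show ((-1 : Int) + 1) = 0 by ring, show ((s.length : Int) - 1 + 1) = (s.length : Int) by ring]
  rw [PySem.List.enumerate_eq_map_pyRange s 0]
  rw [← List.map_reverse, List.foldl_map]
  simp [PySem.List.len]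

-- B's fold body, specialised form of range_fold_eq_enum_fold matching the port syntactically.
theorem B_range_fold (s : List Int) (node2 total start_number : Int) :
    (PySem.List.pyRange ((s.length : Int) - 1) (-1) (-1)).foldl
      (fun (st : List (List Int) × Int × Int) i =>
        ([[start_number + i, st.2.1, st.2.2 - PySem.List.pyGetD s i 0]] ++ st.1,
         start_number + i, PySem.List.pyGetD s i 0))
      ([], node2, total)
    = ((PySem.List.enumerate s 0).reverse).foldl
      (fun (st : List (List Int) × Int × Int) (p : Int × Int) =>
        ([[start_number + p.1, st.2.1, st.2.2 - p.2]] ++ st.1, start_number + p.1, p.2))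
      ([], node2, total) :=
  range_fold_eq_enum_fold s
    (fun (st : List (List Int) × Int × Int) (p : Int × Int) =>
      ([[start_number + p.1, st.2.1, st.2.2 - p.2]] ++ st.1, start_number + p.1, p.2))
    ([], node2, total)

-- B's reversed fold equals pwAux over the node/distance chain from position i to node2.
theorem B_fold_eq_pwAux (node2 total start_number : Int) :
    ∀ (s : List Int) (i : Int),
    ((PySem.List.enumerate s i).reverse).foldl
      (fun (st : List (List Int) × Int × Int) (p : Int × Int) =>
        ([[start_number + p.1, st.2.1, st.2.2 - p.2]] ++ st.1, start_number + p.1, p.2))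
      ([], node2, total)
    = (pwAux (((PySem.List.pyRange i (i + s.length) 1).map (fun k => start_number + k)) ++ [node2])
             (s ++ [total]),
       (match s with | [] => node2 | _ :: _ => start_number + i),
       (match s with | [] => total | d :: _ => d)) := by
  intro s
  induction s with
  | nil =>
    intro i
    simp [PySem.List.enumerate_nil, pwAux]
  | cons d rest ih =>
    intro i
    rw [PySem.List.enumerate_cons, List.reverse_cons, List.foldl_append, ih (i + 1)]
    have hr : PySem.List.pyRange i (i + ((d :: rest).length : Int)) 1
        = i :: PySem.List.pyRange (i + 1) (i + ((d :: rest).length : Int)) 1 :=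
      PySem.List.pyRange_one_cons (by simp only [List.length_cons]; push_cast; omega)
    have hr2 : i + ((d :: rest).length : Int) = (i + 1) + (rest.length : Int) := by
      simp only [List.length_cons]; push_cast; ring
    rw [hr, hr2]
    cases rest with
    | nil =>
      simp [pwAux]
    | cons e rest' =>
      have hr' : PySem.List.pyRange (i + 1) ((i + 1) + ((e :: rest').length : Int)) 1
          = (i + 1) :: PySem.List.pyRange ((i + 1) + 1) ((i + 1) + ((e :: rest').length : Int)) 1 :=
        PySem.List.pyRange_one_cons (by simp only [List.length_cons]; push_cast; omega)
      rw [hr']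
      simp [pwAux]

-- ===== VERDICT (by name: the statement is the Claim_ definition above) =====
theorem update_graph_with_new_nodes_spec : Claim_equal_update_graph_with_new_nodes := by
  intro node1 node2 total_distance lsNodeScannedmm start_number _
  unfold Spec_update_graph_with_new_nodes update_graph_with_new_nodes update_graph_with_new_nodes_alt
  set s := PySem.List.sorted lsNodeScannedmm (fun x => x) false with hs
  rw [PySem.List.foldl_append_singleton_eq_map]
  simp only []
  rw [B_range_fold s node2 total_distance start_number]
  rw [B_fold_eq_pwAux node2 total_distance start_number s 0]
  rw [A_loop_eq_pwAux _ _ (by simp [PySem.List.length_pyRange_one])]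
  cases s with
  | nil =>
    simp [PySem.List.pyRange_one_eq_nil (le_refl (0 : Int)), pwAux]
  | cons d rest =>
    simp only [zero_add]
    have hc : PySem.List.pyRange 0 (((d :: rest).length : Int)) 1
        = 0 :: PySem.List.pyRange 1 (((d :: rest).length : Int)) 1 :=
      PySem.List.pyRange_one_cons (by simp only [List.length_cons]; push_cast; omega)
    rw [hc]
    simp [pwAux]
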